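-- pv_equiv track=rewrite | github.com/danielbahrami/SE04-AI | Adversarial Search/alpha_beta.py | successors_of
-- ===== SOURCE A (Python) =====
-- def successors_of(state):
--     possible_moves = []
--     for i in range(0, len(state)):
--         if state[i] != 1:
--             played_moves = []
--             for j in range(1, int(state[i] / 2) + 1):
--                 played_moves.append([state[i] - j, j])
--             new_state = state.copy()
--             new_state.remove(state[i])
--             for k in played_moves:
--                 k = k + new_state
--                 if k not in possible_moves:
--                     possible_moves.append(k)
--     return possible_moves
-- ===== SOURCE B (Python) =====
-- def successors_of(state):
--     # Deduplicate at the input: equal pile values yield identical successor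
--     # lists, and successors of distinct values can never coincide (the first
--     # two entries of a successor sum to the pile value), so one pass over the
--     # distinct values with plain appends produces the same de-duplicated output.
--     uniq = []
--     seen = set()
--     for v in state:
--         if v not in seen:
--             seen.add(v)
--             uniq.append(v)
--     result = []
--     for v in uniq:
--         if v != 1:
--             rest = state.copy()
--             rest.remove(v)
--             for j in range(1, v // 2 + 1):
--                 result.append([v - j, j] + rest)
--     return result
-- ===== Notes on version B (the rewrite author's own statement) =====
-- stated objective: alternative
-- what changed: B deduplicates at the input (distinct pile values in first-occurrence order, via a seen-set) and emits each value's successors with plain appends, instead of A's per-output membership scan over the growing result list; this is exact because equal pile values generate identical successor lists and successors of distinct values never coincide (the first two entries of a successor sum to the pile value).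
import Mathlib
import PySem

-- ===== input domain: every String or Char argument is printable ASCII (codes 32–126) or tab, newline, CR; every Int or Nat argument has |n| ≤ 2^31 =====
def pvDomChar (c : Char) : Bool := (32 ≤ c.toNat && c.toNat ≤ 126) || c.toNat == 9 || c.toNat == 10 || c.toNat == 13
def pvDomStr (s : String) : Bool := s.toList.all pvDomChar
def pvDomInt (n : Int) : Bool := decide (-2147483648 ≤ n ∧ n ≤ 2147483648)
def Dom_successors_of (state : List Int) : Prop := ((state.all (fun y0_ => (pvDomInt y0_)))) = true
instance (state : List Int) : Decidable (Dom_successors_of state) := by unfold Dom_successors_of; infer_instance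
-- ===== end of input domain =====

-- B replaces A's per-output membership scan by input-level deduplication of the pile values (alternative decomposition; the claim is about the return value only).

-- ===== PORT A =====
-- int(state[i] / 2) is float true division truncated toward zero: exact as Int.tdiv on the domain |n| ≤ 2^31.
-- new_state.remove(state[i]) always succeeds (state[i] ∈ state), so the .getD default is never used.
def successors_of (state : List Int) : List (List Int) :=
  (PySem.List.pyRange 0 (PySem.List.len state) 1).foldl (fun possible_moves i =>
    let v := PySem.List.pyGetD state i 0
    if v ≠ 1 then
      let played_moves := (PySem.List.pyRange 1 (Int.tdiv v 2 + 1) 1).map (fun j => [v - j, j])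
      let new_state := (PySem.List.remove? state v).getD state
      played_moves.foldl (fun pm k =>
        let k' := k ++ new_state
        if k' ∈ pm then pm else pm ++ [k']) possible_moves
    else possible_moves) []

-- ===== PORT B =====
-- first loop: seen-set + uniq list (distinct values, first-occurrence order); second loop: plain appends, no membership test.
def successors_of_alt (state : List Int) : List (List Int) :=
  let su := state.foldl (fun (su : PySem.Set Int × List Int) v =>
      if PySem.Set.contains su.1 v then su else (PySem.Set.add su.1 v, su.2 ++ [v]))
    ((PySem.Set.empty : PySem.Set Int), ([] : List Int))
  su.2.foldl (fun result v =>
    if v ≠ 1 then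
      let rest := (PySem.List.remove? state v).getD state
      (PySem.List.pyRange 1 (PySem.Int.floordiv v 2 + 1) 1).foldl
        (fun result j => result ++ [[v - j, j] ++ rest]) result
    else result) []

-- ===== PRECONDITION & SPEC =====
def Spec_successors_of (state : List Int) (out : List (List Int)) : Prop := out = successors_of_alt state
instance (state : List Int) (out : List (List Int)) : Decidable (Spec_successors_of state out) := by unfold Spec_successors_of; infer_instance

-- ===== CLAIM (what is proved, stated in full; the proofs are below) =====
def Claim_equal_successors_of : Prop := ∀ (state : List Int), Dom_successors_of state → Spec_successors_of state (successors_of state)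

-- ===== LEMMAS AND PROOFS =====

-- the successors contributed by one pile value v
def pvBlk (state : List Int) (v : Int) : List (List Int) :=
  if v ≠ 1 then
    (PySem.List.pyRange 1 (PySem.Int.floordiv v 2 + 1) 1).map
      (fun j => [v - j, j] ++ (PySem.List.remove? state v).getD state)
  else []

-- A's inner dedup-append loop
def pvDApp (acc ks : List (List Int)) : List (List Int) :=
  ks.foldl (fun pm k => if k ∈ pm then pm else pm ++ [k]) acc

theorem pvContains_iff (s : PySem.Set Int) (v : Int) :
    PySem.Set.contains s v = true ↔ v ∈ s := by
  simp [PySem.Set.contains]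

theorem pvAdd_mem (s : PySem.Set Int) (v : Int) (h : v ∈ s) : PySem.Set.add s v = s := by
  simp [PySem.Set.add, h]

theorem pvAdd_not_mem (s : PySem.Set Int) (v : Int) (h : v ∉ s) :
    PySem.Set.add s v = s ++ [v] := by
  simp [PySem.Set.add, h]

theorem pvDApp_of_subset (ks acc : List (List Int)) (h : ∀ k ∈ ks, k ∈ acc) :
    pvDApp acc ks = acc := by
  induction ks with
  | nil => rfl
  | cons k t ih =>
    simp only [pvDApp, List.foldl_cons, if_pos (h k (List.mem_cons_self ..))]
    exact ih (fun x hx => h x (List.mem_cons_of_mem _ hx))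

theorem pvDApp_of_fresh (ks : List (List Int)) (hnd : ks.Nodup) :
    ∀ acc, (∀ k ∈ ks, k ∉ acc) → pvDApp acc ks = acc ++ ks := by
  induction ks with
  | nil => intro acc _; simp [pvDApp]
  | cons k t ih =>
    intro acc h
    simp only [pvDApp, List.foldl_cons, if_neg (h k (List.mem_cons_self ..))]
    have := ih hnd.of_cons (acc ++ [k]) (fun x hx => by
      simp only [List.mem_append, List.mem_singleton]
      rintro (hxa | rfl)
      · exact h x (List.mem_cons_of_mem _ hx) hxa
      · exact (List.nodup_cons.mp hnd).1 hx)
    simpa [pvDApp, List.append_assoc] using this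

-- truncating and flooring halves generate the same j-range (both empty for v <= 1)
theorem pvRange_eq (v : Int) :
    PySem.List.pyRange 1 (Int.tdiv v 2 + 1) 1 = PySem.List.pyRange 1 (PySem.Int.floordiv v 2 + 1) 1 := by
  rcases (show 0 ≤ v ∨ v < 0 by omega) with hv | hv
  · rw [Int.tdiv_eq_ediv_of_nonneg hv, PySem.Int.floordiv_eq_ediv_of_pos (by norm_num)]
  · have h1 : Int.tdiv v 2 ≤ 0 := by
      have h := Int.tdiv_nonneg (a := -v) (b := 2) (by omega) (by norm_num)
      rw [Int.neg_tdiv] at h; omega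
    have h2 : PySem.Int.floordiv v 2 ≤ 0 := by
      rw [PySem.Int.floordiv_eq_ediv_of_pos (by norm_num)]
      have := Int.ediv_le_ediv (a := v) (b := 0) (c := 2) (by norm_num) (by omega)
      simpa using this
    rw [PySem.List.pyRange_one_eq_nil (by omega), PySem.List.pyRange_one_eq_nil (by omega)]

-- a successor determines its pile value: its first two entries sum to v
theorem pvBlk_disjoint (state : List Int) (v w : Int) (hvw : v ≠ w) (k : List Int)
    (hv : k ∈ pvBlk state v) (hw : k ∈ pvBlk state w) : False := by
  unfold pvBlk at hv hw
  by_cases h1 : v ≠ 1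
  · by_cases h2 : w ≠ 1
    · rw [if_pos h1] at hv; rw [if_pos h2] at hw
      obtain ⟨j, _, rfl⟩ := List.mem_map.mp hv
      obtain ⟨j', _, hk⟩ := List.mem_map.mp hw
      simp only [List.cons_append, List.cons.injEq] at hk
      omega
    · rw [if_neg h2] at hw; simp at hw
  · rw [if_neg h1] at hv; simp at hv

theorem pvBlk_nodup (state : List Int) (v : Int) : (pvBlk state v).Nodup := by
  unfold pvBlk
  split
  · refine List.Nodup.map ?_ (PySem.List.nodup_pyRange_one _ _)
    intro a b h
    simp only [List.cons_append, List.cons.injEq] at h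
    omega
  · exact List.nodup_nil

-- core: dedup-appending the blocks of all values = plain-appending the blocks of the distinct values
theorem pvMain (state : List Int) (l : List Int) (s : PySem.Set Int) :
    l.foldl (fun acc v => pvDApp acc (pvBlk state v)) (s.flatMap (pvBlk state))
      = (l.foldl PySem.Set.add s).flatMap (pvBlk state) := by
  induction l generalizing s with
  | nil => rfl
  | cons v t ih =>
    by_cases hv : v ∈ s
    · have hstep : pvDApp (s.flatMap (pvBlk state)) (pvBlk state v) = s.flatMap (pvBlk state) :=
        pvDApp_of_subset _ _ (fun k hk => List.mem_flatMap.mpr ⟨v, hv, hk⟩)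
      simp only [List.foldl_cons, hstep, pvAdd_mem s v hv, ih]
    · have hstep : pvDApp (s.flatMap (pvBlk state)) (pvBlk state v)
          = s.flatMap (pvBlk state) ++ pvBlk state v :=
        pvDApp_of_fresh _ (pvBlk_nodup state v) _ (fun k hk hmem => by
          obtain ⟨w, hws, hkw⟩ := List.mem_flatMap.mp hmem
          exact pvBlk_disjoint state w v (fun h => hv (h ▸ hws)) k hkw hk)
      have hflat : (s ++ [v]).flatMap (pvBlk state) = s.flatMap (pvBlk state) ++ pvBlk state v := by
        simp
      simp only [List.foldl_cons, hstep, pvAdd_not_mem s v hv, ← hflat, ih]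

-- B's first loop keeps its two accumulators equal
theorem pvSeenUniq (l : List Int) (s : PySem.Set Int) :
    l.foldl (fun (su : PySem.Set Int × List Int) v =>
        if PySem.Set.contains su.1 v then su else (PySem.Set.add su.1 v, su.2 ++ [v]))
      (s, s)
      = (l.foldl PySem.Set.add s, l.foldl PySem.Set.add s) := by
  induction l generalizing s with
  | nil => rfl
  | cons v t ih =>
    simp only [List.foldl_cons]
    by_cases h : v ∈ s
    · rw [if_pos ((pvContains_iff s v).mpr h), pvAdd_mem s v h]
      exact ih s
    · have hc : ¬ PySem.Set.contains s v = true := fun hc => h ((pvContains_iff s v).mp hc)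
      rw [if_neg hc, pvAdd_not_mem s v h]
      exact ih (s ++ [v])

-- A computes the dedup-append fold over all values
theorem pvA_eq (state : List Int) :
    successors_of state = state.foldl (fun acc v => pvDApp acc (pvBlk state v)) [] := by
  have h := PySem.List.foldl_pyRange_zero_pyGetD (xs := state) (d := (0 : Int))
      (init := ([] : List (List Int)))
      (f := fun acc v =>
        if v ≠ 1 then
          ((PySem.List.pyRange 1 (Int.tdiv v 2 + 1) 1).map (fun j => [v - j, j])).foldl
            (fun pm k =>
              if (k ++ (PySem.List.remove? state v).getD state) ∈ pm then pm
              else pm ++ [k ++ (PySem.List.remove? state v).getD state]) acc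
        else acc)
  refine Eq.trans h ?_
  refine PySem.List.foldl_congr_mem _ _ _ _ ?_
  intro acc v _
  by_cases hv : v = 1
  · simp [hv, pvBlk, pvDApp]
  · simp only [if_pos (show v ≠ 1 from hv)]
    rw [pvRange_eq]
    simp only [pvBlk, pvDApp, if_pos (show v ≠ 1 from hv), List.foldl_map]

-- B computes the plain-append fold over the distinct values
theorem pvB_eq (state : List Int) :
    successors_of_alt state = (state.foldl PySem.Set.add []).flatMap (pvBlk state) := by
  unfold successors_of_alt
  have h0 : ((PySem.Set.empty : PySem.Set Int), ([] : List Int))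
      = ((([] : PySem.Set Int)), (([] : PySem.Set Int))) := rfl
  rw [h0, pvSeenUniq state ([] : PySem.Set Int)]
  have hstep1 : ∀ (acc : List (List Int)) (v : Int),
      (if v ≠ 1 then
          (PySem.List.pyRange 1 (PySem.Int.floordiv v 2 + 1) 1).foldl
            (fun result j =>
              result ++ [[v - j, j] ++ (PySem.List.remove? state v).getD state]) acc
        else acc) = acc ++ pvBlk state v := by
    intro acc v
    by_cases hv : v = 1
    · simp [hv, pvBlk]
    · rw [if_pos (show v ≠ 1 from hv), PySem.List.foldl_append_singleton_eq_map]
      simp [pvBlk, hv]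
  have hsteps : ∀ (l : List Int) (acc : List (List Int)),
      l.foldl (fun result v =>
        if v ≠ 1 then
          (PySem.List.pyRange 1 (PySem.Int.floordiv v 2 + 1) 1).foldl
            (fun result j =>
              result ++ [[v - j, j] ++ (PySem.List.remove? state v).getD state]) result
        else result) acc = acc ++ l.flatMap (pvBlk state) := by
    intro l
    induction l with
    | nil => intro acc; simp
    | cons v t ih =>
      intro acc
      rw [List.foldl_cons, hstep1, ih, List.flatMap_cons, List.append_assoc]
  exact (hsteps _ []).trans (by simp)

-- ===== VERDICT (by name: the statement is the Claim_ definition above) =====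
theorem successors_of_spec : Claim_equal_successors_of := by
  intro state _
  unfold Spec_successors_of
  rw [pvA_eq, pvB_eq]
  simpa using pvMain state state []
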